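-- pv_equiv track=rewrite | github.com/glando22/QB_Tackles | QB_TKL.py | find_opponent_roster
-- ===== SOURCE A (Python) =====
-- def find_opponent_roster(roster_id, sleeper_matchups):
--     matchup_id = None
--     # Step 1: find my matchup_id
--     for roster in sleeper_matchups:
--         if roster["roster_id"] == roster_id:
--             matchup_id = roster.get("matchup_id")
--             break
--     if matchup_id is None:
--         return None  # not found or bye week
--     # Step 2: find the opponent with the same matchup_id
--     for roster in sleeper_matchups:
--         if roster.get("matchup_id") == matchup_id and roster["roster_id"] != roster_id:
--             return roster["roster_id"]
--     return None  # no opponent found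
-- ===== SOURCE B (Python) =====
-- def find_opponent_roster(roster_id, sleeper_matchups):
--     # One forward pass, never rescanning: while looking for my roster, bucket the first
--     # differing roster_id per matchup_id; once found, answer from the bucket, or else
--     # keep walking the SAME iterator forward.
--     opp_first = {}
--     my_mid = None
--     it = iter(sleeper_matchups)
--     for roster in it:
--         rid = roster["roster_id"]
--         if rid == roster_id:
--             my_mid = roster.get("matchup_id")
--             break
--         mid = roster.get("matchup_id")
--         if mid is not None and mid not in opp_first:
--             opp_first[mid] = rid
--     if my_mid is None:
--         return None  # not found or bye week
--     if my_mid in opp_first: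
--         return opp_first[my_mid]  # opponent already seen before my roster
--     for roster in it:
--         if roster.get("matchup_id") != my_mid:
--             continue
--         rid = roster["roster_id"]
--         if rid != roster_id:
--             return rid
--     return None  # no opponent found
-- ===== Notes on version B (the rewrite author's own statement) =====
-- stated objective: alternative
-- what changed: Replaces A's two scans (find my matchup_id, then rescan the whole list for the opponent) by one forward pass that buckets the first differing roster_id per matchup_id while hunting my roster, then answers from the bucket or continues the same iterator, never rescanning the prefix.
import Mathlib
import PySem

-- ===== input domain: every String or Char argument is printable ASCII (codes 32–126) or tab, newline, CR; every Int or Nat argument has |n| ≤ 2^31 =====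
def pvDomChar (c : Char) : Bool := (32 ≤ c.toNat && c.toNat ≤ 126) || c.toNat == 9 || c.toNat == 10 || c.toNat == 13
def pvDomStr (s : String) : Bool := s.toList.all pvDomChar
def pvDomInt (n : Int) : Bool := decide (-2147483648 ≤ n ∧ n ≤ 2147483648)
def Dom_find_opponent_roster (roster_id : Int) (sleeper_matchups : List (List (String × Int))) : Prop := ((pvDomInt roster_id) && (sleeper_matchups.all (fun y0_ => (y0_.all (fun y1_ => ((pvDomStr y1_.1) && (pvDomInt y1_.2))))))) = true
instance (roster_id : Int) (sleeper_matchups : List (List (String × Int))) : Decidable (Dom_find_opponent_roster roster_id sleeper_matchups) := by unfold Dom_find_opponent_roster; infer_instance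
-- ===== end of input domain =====

-- B replaces A's two full scans by ONE forward pass: it buckets the first differing roster_id per
-- matchup_id while hunting my roster, answers from the bucket, or walks the same iterator on
-- (objective: alternative; never rescans the prefix A's second loop revisits).


-- shared dict-access helper: roster["k"] / roster.get("k") on the association-list dict
def pvGet (r : List (String × Int)) (k : String) : Option Int :=
  (PySem.Dict.mk r).get? k

-- ===== PORT A =====
-- Step 1 loop: first roster with roster["roster_id"] == roster_id gives roster.get("matchup_id");
-- a reached roster without "roster_id" is a Python KeyError (outside Pre_; the port returns none there).
def pvStep1 (roster_id : Int) : List (List (String × Int)) → Option Int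
  | [] => none
  | r :: rest =>
      match pvGet r "roster_id" with
      | some v => if v = roster_id then pvGet r "matchup_id" else pvStep1 roster_id rest
      | none => none          -- KeyError in Python; outside Pre_
-- Step 2 loop: first roster with the same matchup_id and a different roster_id.
def pvStep2 (roster_id : Int) (mid : Int) : List (List (String × Int)) → Option Int
  | [] => none
  | r :: rest =>
      if pvGet r "matchup_id" = some mid then
        match pvGet r "roster_id" with
        | some v => if v ≠ roster_id then some v else pvStep2 roster_id mid rest
        | none => none        -- KeyError in Python; outside Pre_
      else pvStep2 roster_id mid rest

def find_opponent_roster (roster_id : Int) (sleeper_matchups : List (List (String × Int))) : Option Int :=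
  match pvStep1 roster_id sleeper_matchups with
  | none => none              -- matchup_id is None: not found or bye week
  | some mid => pvStep2 roster_id mid sleeper_matchups

-- ===== PORT B =====
-- Source B's second loop: continue the SAME iterator (the list suffix after my roster); skip rosters
-- whose matchup differs, then read roster["roster_id"] (none = KeyError, outside Pre_).
def pvPhase2 (roster_id : Int) (my_mid : Int) : List (List (String × Int)) → Option Int
  | [] => none
  | r :: rest =>
      if pvGet r "matchup_id" ≠ some my_mid then pvPhase2 roster_id my_mid rest   -- continue
      else
        match pvGet r "roster_id" with
        | none => none        -- KeyError in Python; outside Pre_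
        | some rid => if rid ≠ roster_id then some rid else pvPhase2 roster_id my_mid rest
-- Source B's first loop: hunt my roster while bucketing, per non-None matchup_id, the first roster_id
-- seen; on break yield (my matchup_id, bucket, remaining suffix of the iterator).
def pvPhase1 (roster_id : Int) : List (List (String × Int)) → PySem.Dict Int Int →
    Option (Option Int × PySem.Dict Int Int × List (List (String × Int)))
  | [], opp => some (none, opp, [])
  | r :: rest, opp =>
      match pvGet r "roster_id" with
      | none => none          -- KeyError in Python; outside Pre_
      | some rid =>
          if rid = roster_id then some (pvGet r "matchup_id", opp, rest)   -- break
          else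
            match pvGet r "matchup_id" with
            | some mid => pvPhase1 roster_id rest
                (if opp.contains mid then opp else opp.insert mid rid)
            | none => pvPhase1 roster_id rest opp

def find_opponent_roster_alt (roster_id : Int) (sleeper_matchups : List (List (String × Int))) : Option Int :=
  match pvPhase1 roster_id sleeper_matchups PySem.Dict.empty with
  | none => none              -- KeyError propagated; outside Pre_
  | some (my_mid, opp_first, it) =>
      match my_mid with
      | none => none          -- not found or bye week
      | some m =>
          match opp_first.get? m with
          | some w => some w  -- opponent already seen before my roster
          | none => pvPhase2 roster_id m it

-- ===== PRECONDITION & SPEC =====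
-- Pre_ excludes EXACTLY the inputs on which the Pythons raise KeyError (A and B raise on the same
-- inputs): a roster without "roster_id" reached before any roster matching roster_id, or one with
-- my matchup_id reached by the opponent search before any roster it would return.
def pvPre1B (roster_id : Int) (l : List (List (String × Int))) : Bool :=
  (List.range l.length).all fun j =>
    !(pvGet (l.getD j []) "roster_id" == none) ||
    (List.range j).any fun i => pvGet (l.getD i []) "roster_id" == some roster_id

def pvPre2B (roster_id : Int) (l : List (List (String × Int))) : Bool :=
  (List.range l.length).all fun k =>
    !(pvGet (l.getD k []) "roster_id" == some roster_id) ||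
    !((List.range k).all fun i => !(pvGet (l.getD i []) "roster_id" == some roster_id)) ||
    ((List.range l.length).all fun j =>
      !(pvGet (l.getD j []) "roster_id" == none) ||
      !(pvGet (l.getD j []) "matchup_id" == pvGet (l.getD k []) "matchup_id") ||
      !(pvGet (l.getD k []) "matchup_id").isSome ||
      ((List.range j).any fun i =>
        (pvGet (l.getD i []) "matchup_id" == pvGet (l.getD k []) "matchup_id") &&
        (pvGet (l.getD i []) "roster_id").isSome &&
        !(pvGet (l.getD i []) "roster_id" == some roster_id)))

def Pre_find_opponent_roster (roster_id : Int) (sleeper_matchups : List (List (String × Int))) : Prop :=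
  (pvPre1B roster_id sleeper_matchups && pvPre2B roster_id sleeper_matchups) = true
instance (roster_id : Int) (sleeper_matchups : List (List (String × Int))) : Decidable (Pre_find_opponent_roster roster_id sleeper_matchups) := by unfold Pre_find_opponent_roster; infer_instance

def pvWitness_find_opponent_roster : Int × (List (List (String × Int))) :=
  (1, [[("roster_id", 1), ("matchup_id", 5)], [("roster_id", 2), ("matchup_id", 5)]])

def Spec_find_opponent_roster (roster_id : Int) (sleeper_matchups : List (List (String × Int))) (out : Option Int) : Prop := out = find_opponent_roster_alt roster_id sleeper_matchups
instance (roster_id : Int) (sleeper_matchups : List (List (String × Int))) (out : Option Int) : Decidable (Spec_find_opponent_roster roster_id sleeper_matchups out) := by unfold Spec_find_opponent_roster; infer_instance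

-- ===== CLAIM (what is proved, stated in full; the proofs are below) =====
def Claim_equal_find_opponent_roster : Prop := ∀ (roster_id : Int) (sleeper_matchups : List (List (String × Int))), Dom_find_opponent_roster roster_id sleeper_matchups → Pre_find_opponent_roster roster_id sleeper_matchups → Spec_find_opponent_roster roster_id sleeper_matchups (find_opponent_roster roster_id sleeper_matchups)

-- ===== LEMMAS AND PROOFS =====

-- B's continuation loop computes exactly A's step-2 scan on the same suffix.
lemma pvPhase2_eq_step2 (roster_id my_mid : Int) (l : List (List (String × Int))) :
    pvPhase2 roster_id my_mid l = pvStep2 roster_id my_mid l := by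
  induction l with
  | nil => simp [pvPhase2, pvStep2]
  | cons r rest ih =>
      by_cases hm : pvGet r "matchup_id" = some my_mid
      · cases hg : pvGet r "roster_id" with
        | none => simp [pvPhase2, pvStep2, hm, hg]
        | some v =>
            by_cases hv : v = roster_id <;> simp [pvPhase2, pvStep2, hm, hg, hv, ih]
      · simp [pvPhase2, pvStep2, hm, ih]

-- The invariant of B's single pass: with bucket opp accumulated so far, B's remaining computation
-- equals A's two scans of the remaining list, except that a bucket hit short-circuits step 2.
lemma pvPhase1_invariant (roster_id : Int) (l : List (List (String × Int)))
    (opp : PySem.Dict Int Int) :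
    (match pvPhase1 roster_id l opp with
     | none => none
     | some (my_mid, o, it) =>
         match my_mid with
         | none => none
         | some m =>
             match o.get? m with
             | some w => some w
             | none => pvPhase2 roster_id m it)
    = match pvStep1 roster_id l with
      | none => none
      | some mid =>
          match opp.get? mid with
          | some w => some w
          | none => pvStep2 roster_id mid l := by
  induction l generalizing opp with
  | nil => simp [pvPhase1, pvStep1]
  | cons r rest ih =>
      cases hg : pvGet r "roster_id" with
      | none => simp [pvPhase1, pvStep1, hg]
      | some v =>
          by_cases hv : v = roster_id
      -- break: my matchup decides; a bucket hit is the opponent A's step 2 found in the prefix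
          · cases hm : pvGet r "matchup_id" with
            | none => simp [pvPhase1, pvStep1, hg, hv, hm]
            | some m =>
                cases ho : opp.get? m with
                | some w => simp [pvPhase1, pvStep1, hg, hv, hm, ho]
                | none =>
                    have hstep : pvStep2 roster_id m (r :: rest) = pvStep2 roster_id m rest := by
                      simp [pvStep2, hm, hg, hv]
                    simp [pvPhase1, pvStep1, hg, hv, hm, ho, hstep, pvPhase2_eq_step2]
          · cases hm : pvGet r "matchup_id" with
            | none =>
                have hstep : ∀ mid, pvStep2 roster_id mid (r :: rest) = pvStep2 roster_id mid rest := by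
                  intro mid; simp [pvStep2, hm]
                simp only [pvPhase1, pvStep1, hg, hv, if_false, hm, ih]
                cases pvStep1 roster_id rest with
                | none => rfl
                | some mid => simp [hstep]
            | some m' =>
                by_cases hc : opp.contains m' = true
                · have hocc : ∀ mid, (if opp.contains m' then opp else opp.insert m' v).get? mid = opp.get? mid := by
                    intro mid; simp [hc]
                  simp only [pvPhase1, pvStep1, hg, hv, if_false, hm, ih]
                  cases hs : pvStep1 roster_id rest with
                  | none => rfl
                  | some mid =>
                      by_cases hmm : mid = m'
                      · subst hmm
                        have : (opp.get? mid).isSome = true := by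
                          rw [← PySem.Dict.contains_eq_isSome_get?]; exact hc
                        cases ho : opp.get? mid with
                        | none => simp [ho] at this
                        | some w => simp [hocc, ho]
                      · have hstep : pvStep2 roster_id mid (r :: rest) = pvStep2 roster_id mid rest := by
                          have : pvGet r "matchup_id" ≠ some mid := by
                            simp [hm]; intro h; exact absurd h.symm hmm
                          simp [pvStep2, this]
                        simp [hocc, hstep]
                · have hc' : opp.contains m' = false := by
                    cases h : opp.contains m' with
                    | true => exact absurd h hc
                    | false => rfl
                  simp only [pvPhase1, pvStep1, hg, hv, if_false, hm, hc', Bool.false_eq_true,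
                    if_false, ih]
                  cases hs : pvStep1 roster_id rest with
                  | none => rfl
                  | some mid =>
                      by_cases hmm : mid = m'
                      · subst hmm
                        have ho : opp.get? mid = none := by
                          rw [PySem.Dict.get?_eq_none_iff_contains]; exact hc'
                        have hstep : pvStep2 roster_id mid (r :: rest) = some v := by
                          simp [pvStep2, hm, hg, hv]
                        simp [PySem.Dict.get?_insert, ho, hstep]
                      · have hins := PySem.Dict.get?_insert_of_ne (k' := mid) (k := m') opp v hmm
                        have hstep : pvStep2 roster_id mid (r :: rest) = pvStep2 roster_id mid rest := by
                          have : pvGet r "matchup_id" ≠ some mid := by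
                            simp [hm]; intro h; exact absurd h.symm hmm
                          simp [pvStep2, this]
                        simp [hins, hstep]

-- ===== VERDICT (by name: the statement is the Claim_ definition above) =====
theorem find_opponent_roster_spec : Claim_equal_find_opponent_roster := by
  intro roster_id l _ _
  unfold Spec_find_opponent_roster find_opponent_roster find_opponent_roster_alt
  have h := pvPhase1_invariant roster_id l PySem.Dict.empty
  simp only [PySem.Dict.get?_empty] at h
  rw [← h]
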